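-- pv_equiv track=rewrite | github.com/yazsd/screener | pine-py/pine_to_py_v1_without_sec.py | get_me_direction
-- ===== SOURCE A (Python) =====
-- def get_me_direction(me__isUp_prev_and__isDown, me_isDown_prev_and__isUp):
--     me_direction = []
--     for i in range(len(me__isUp_prev_and__isDown)):
--         if me__isUp_prev_and__isDown[i]:
--             me_direction.append(-1)
--         elif me_isDown_prev_and__isUp[i]:
--             me_direction.append(1)
--         else:
--             try:
--                 me_direction.append(me_direction[-1])
--             except:
--                 me_direction.append(1)
--     return me_direction
-- ===== SOURCE B (Python) =====
-- def get_me_direction(me__isUp_prev_and__isDown, me_isDown_prev_and__isUp):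
--     up, down = me__isUp_prev_and__isDown, me_isDown_prev_and__isUp
--     n = len(up)
--     # sparse list of signal events: (position, direction); down[i] read only when up[i] is false
--     events = [(i, -1 if up[i] else 1) for i in range(n) if up[i] or down[i]]
--     starts = [p for p, _ in events]
--     # run-length expansion: each event's value fills up to the next event's position (or n);
--     # positions before the first event get the default 1
--     out = [1] * (starts[0] if starts else n)
--     for (p, v), nxt in zip(events, starts[1:] + [n]):
--         out += [v] * (nxt - p)
--     return out
-- ===== Notes on version B (the rewrite author's own statement) =====
-- stated objective: alternative
-- what changed: B builds a sparse list of signal events (position, direction) with a comprehension and materializes the output by run-length expansion, zipping each event with the next event's position and appending one run per event, instead of A's per-element append loop that branches and carries the list's last element via try/except.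
import Mathlib
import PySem

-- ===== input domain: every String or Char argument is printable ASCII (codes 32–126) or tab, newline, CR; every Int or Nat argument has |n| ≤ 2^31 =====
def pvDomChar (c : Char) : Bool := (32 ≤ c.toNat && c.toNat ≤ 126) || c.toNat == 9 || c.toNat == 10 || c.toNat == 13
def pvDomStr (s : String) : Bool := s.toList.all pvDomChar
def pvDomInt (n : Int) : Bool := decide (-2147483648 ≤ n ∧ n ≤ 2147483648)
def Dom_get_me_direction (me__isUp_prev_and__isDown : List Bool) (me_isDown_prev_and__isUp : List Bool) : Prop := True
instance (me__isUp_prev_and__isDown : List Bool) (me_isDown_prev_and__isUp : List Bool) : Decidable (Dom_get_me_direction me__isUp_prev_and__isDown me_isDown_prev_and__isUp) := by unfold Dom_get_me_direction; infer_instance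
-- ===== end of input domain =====

-- B replaces A's per-element carry loop by a sparse event list (position, direction) materialized through run-length expansion between event positions (alternative algorithm, same cost); equivalence proved on inputs where A raises no IndexError.


-- ===== PORT A =====
-- A's loop: for i in range(len(up)): branch, append; me_direction[-1] with try/except
-- is (acc.pyGet? (-1)).getD 1 (acc[-1] raises exactly when acc = [], caught → 1).
-- down[i] is read via getD false: exact inside Pre_ (index in range there).
def get_me_direction (me__isUp_prev_and__isDown : List Bool) (me_isDown_prev_and__isUp : List Bool) : List Int :=
  (List.range me__isUp_prev_and__isDown.length).foldl (fun acc i =>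
    if me__isUp_prev_and__isDown.getD i false then acc ++ [-1]
    else if me_isDown_prev_and__isUp.getD i false then acc ++ [1]
    else acc ++ [(PySem.List.pyGet? acc (-1)).getD 1]) []

-- ===== PORT B =====
-- Source B's events comprehension: sparse (position, direction) signal list over range n
-- (the condition reads down[i] only when up[i] is false, exact inside Pre_).
def pvEventsOf (up down : List Bool) (n : Nat) : List (Nat × Int) :=
  ((List.range n).filter (fun i => up.getD i false || down.getD i false)).map
    (fun i => (i, if up.getD i false then (-1 : Int) else 1))

-- Source B: out = [1]*(starts[0] if starts else n); then the zip loop appends, for each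
-- event paired with the next event's position (or n), one run [v]*(nxt - p).
def get_me_direction_alt (me__isUp_prev_and__isDown : List Bool) (me_isDown_prev_and__isUp : List Bool) : List Int :=
  let n := me__isUp_prev_and__isDown.length
  let events := pvEventsOf me__isUp_prev_and__isDown me_isDown_prev_and__isUp n
  let starts := events.map Prod.fst
  (List.zip events (starts.tail ++ [n])).foldl
    (fun out pr => out ++ List.replicate (pr.2 - pr.1.1) pr.1.2)
    (List.replicate (match starts with | [] => n | p :: _ => p) 1)

-- ===== PRECONDITION & SPEC =====
-- Pre_ excludes exactly the inputs where Python raises IndexError: some index i with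
-- up[i] false but i beyond the second list's length (both A and B read down[i] there).
def Pre_get_me_direction (me__isUp_prev_and__isDown : List Bool) (me_isDown_prev_and__isUp : List Bool) : Prop :=
  ∀ i ∈ List.range me__isUp_prev_and__isDown.length,
    me__isUp_prev_and__isDown.getD i false = true ∨ i < me_isDown_prev_and__isUp.length
instance (me__isUp_prev_and__isDown : List Bool) (me_isDown_prev_and__isUp : List Bool) : Decidable (Pre_get_me_direction me__isUp_prev_and__isDown me_isDown_prev_and__isUp) := by unfold Pre_get_me_direction; infer_instance

def pvWitness_get_me_direction : List Bool × List Bool := ([true, false, false, true], [false, true, false, false])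

def Spec_get_me_direction (me__isUp_prev_and__isDown : List Bool) (me_isDown_prev_and__isUp : List Bool) (out : List Int) : Prop := out = get_me_direction_alt me__isUp_prev_and__isDown me_isDown_prev_and__isUp
instance (me__isUp_prev_and__isDown : List Bool) (me_isDown_prev_and__isUp : List Bool) (out : List Int) : Decidable (Spec_get_me_direction me__isUp_prev_and__isDown me_isDown_prev_and__isUp out) := by unfold Spec_get_me_direction; infer_instance

-- ===== CLAIM (what is proved, stated in full; the proofs are below) =====
def Claim_equal_get_me_direction : Prop := ∀ (me__isUp_prev_and__isDown : List Bool) (me_isDown_prev_and__isUp : List Bool), Dom_get_me_direction me__isUp_prev_and__isDown me_isDown_prev_and__isUp → Pre_get_me_direction me__isUp_prev_and__isDown me_isDown_prev_and__isUp → Spec_get_me_direction me__isUp_prev_and__isDown me_isDown_prev_and__isUp (get_me_direction me__isUp_prev_and__isDown me_isDown_prev_and__isUp)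

-- ===== LEMMAS AND PROOFS =====

-- proof-side view of Source B's zip loop: recursive run-length expansion of an event list
def pvExpand (n : Nat) : List (Nat × Int) → List Int
  | [] => []
  | (p, v) :: rest =>
    List.replicate ((match rest with | [] => n | (q, _) :: _ => q) - p) v ++ pvExpand n rest

-- B's zip loop computes exactly the recursive expansion, appended to its accumulator
theorem pvZipFold (es : List (Nat × Int)) (n : Nat) (acc : List Int) :
    (List.zip es ((es.map Prod.fst).tail ++ [n])).foldl
      (fun out pr => out ++ List.replicate (pr.2 - pr.1.1) pr.1.2) acc
    = acc ++ pvExpand n es := by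
  induction es generalizing acc with
  | nil => simp [pvExpand]
  | cons e rest ih =>
    obtain ⟨p, v⟩ := e
    cases rest with
    | nil => simp [pvExpand]
    | cons e' rest' =>
      obtain ⟨q, w⟩ := e'
      simp only [List.map_cons, List.tail_cons, List.cons_append, List.zip_cons_cons,
        List.foldl_cons] at ih ⊢
      rw [ih]
      have h1 : pvExpand n ((p, v) :: (q, w) :: rest')
          = List.replicate (q - p) v ++ pvExpand n ((q, w) :: rest') := rfl
      rw [h1, List.append_assoc]

-- Python's l[-1] under try/except-default-1 is the last element, default 1.
theorem pyGet_neg_one_getD (l : List Int) :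
    (PySem.List.pyGet? l (-1)).getD 1 = l.getLast?.getD 1 := by
  cases l with
  | nil => simp [PySem.List.pyGet?, PySem.List.pyIdx?]
  | cons a as =>
    simp [PySem.List.pyGet?, PySem.List.pyIdx?, List.getLast?_eq_getElem?]

theorem pvEventsOf_succ (up down : List Bool) (m : Nat) :
    pvEventsOf up down (m + 1)
      = pvEventsOf up down m
        ++ (if up.getD m false || down.getD m false
            then [(m, if up.getD m false then (-1 : Int) else 1)] else []) := by
  unfold pvEventsOf
  rw [List.range_succ, List.filter_append, List.map_append]
  cases hu : up.getD m false <;> cases hd : down.getD m false <;>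
    simp_all [List.filter_singleton, List.getD_eq_getElem?_getD]

theorem pvEventsOf_pos {up down : List Bool} {m : Nat} :
    ∀ e ∈ pvEventsOf up down m, e.1 < m := by
  intro e he
  unfold pvEventsOf at he
  obtain ⟨i, hi, rfl⟩ := List.mem_map.1 he
  exact List.mem_range.1 (List.mem_filter.1 hi).1

-- run-length expansion of an event list with a final event appended
theorem pvExpand_append_last (es : List (Nat × Int)) (p : Nat) (v : Int) (n : Nat) :
    pvExpand n (es ++ [(p, v)]) = pvExpand p es ++ List.replicate (n - p) v := by
  induction es with
  | nil => simp [pvExpand]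
  | cons e rest ih =>
    obtain ⟨q, w⟩ := e
    cases rest with
    | nil => simp [pvExpand]
    | cons e' rest' =>
      obtain ⟨q', w'⟩ := e'
      rw [List.cons_append]
      have h1 : pvExpand n ((q, w) :: ((q', w') :: rest' ++ [(p, v)]))
          = List.replicate (q' - q) w ++ pvExpand n ((q', w') :: rest' ++ [(p, v)]) := rfl
      rw [h1, ih, pvExpand]
      simp [List.append_assoc]

-- bumping the terminal bound by one appends one copy of the final event's value
theorem pvExpand_bump (es : List (Nat × Int)) (e : Nat × Int) (m : Nat) (hp : e.1 ≤ m) :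
    pvExpand (m + 1) (es ++ [e]) = pvExpand m (es ++ [e]) ++ [e.2] := by
  obtain ⟨p, v⟩ := e
  rw [pvExpand_append_last, pvExpand_append_last]
  have h : m + 1 - p = (m - p) + 1 := by omega
  rw [h, List.replicate_succ', List.append_assoc]

-- same, phrased for a nonempty event list with positions below the bound
theorem pvExpand_bump' (es : List (Nat × Int)) (m : Nat) (hne : es ≠ [])
    (hlt : ∀ e ∈ es, e.1 < m) :
    pvExpand (m + 1) es = pvExpand m es ++ [((es.getLast?.map Prod.snd).getD 1)] := by
  have hmem := List.getLast_mem hne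
  have hdec : es = es.dropLast ++ [es.getLast hne] := (List.dropLast_append_getLast hne).symm
  rw [hdec, pvExpand_bump _ _ _ (le_of_lt (hlt _ hmem)), List.getLast?_concat]
  simp

-- B's construction over the first m indices (get_me_direction_alt at m = up.length)
def pvBuild (up down : List Bool) (m : Nat) : List Int :=
  List.replicate (match pvEventsOf up down m with | [] => m | (p, _) :: _ => p) 1
    ++ pvExpand m (pvEventsOf up down m)

theorem pvBuild_succ (up down : List Bool) (m : Nat) :
    pvBuild up down (m + 1)
      = pvBuild up down m
        ++ [if up.getD m false then (-1 : Int)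
            else if down.getD m false then 1
            else ((pvEventsOf up down m).getLast?.map Prod.snd).getD 1] := by
  unfold pvBuild
  rw [pvEventsOf_succ]
  by_cases hsig : (up.getD m false || down.getD m false) = true
  · rw [if_pos hsig]
    cases hes : pvEventsOf up down m with
    | nil =>
      simp only [List.nil_append]
      cases hu : up.getD m false <;>
        simp_all [pvExpand, List.replicate_succ']
    | cons e rest =>
      obtain ⟨p, w⟩ := e
      rw [pvExpand_append_last]
      cases hu : up.getD m false <;>
        simp_all [List.append_assoc, List.replicate_succ']
  · rw [if_neg hsig, List.append_nil]
    have hu : up[m]?.getD false = false := by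
      cases h : up[m]?.getD false
      · rfl
      · exact absurd (by simp [List.getD_eq_getElem?_getD, h]) hsig
    have hd : down[m]?.getD false = false := by
      cases h : down[m]?.getD false
      · rfl
      · exact absurd (by simp [List.getD_eq_getElem?_getD, h]) hsig
    cases hes : pvEventsOf up down m with
    | nil => simp [List.getD_eq_getElem?_getD, hu, hd, pvExpand, List.replicate_succ']
    | cons e rest =>
      rw [pvExpand_bump' _ m (by simp) (by rw [← hes]; exact pvEventsOf_pos)]
      simp [List.getD_eq_getElem?_getD, hu, hd, List.append_assoc]

theorem pvInvariant (up down : List Bool) (m : Nat) :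
    (List.range m).foldl (fun acc i =>
        if up.getD i false then acc ++ [-1]
        else if down.getD i false then acc ++ [1]
        else acc ++ [(PySem.List.pyGet? acc (-1)).getD 1]) []
      = pvBuild up down m
    ∧ ((List.range m).foldl (fun acc i =>
        if up.getD i false then acc ++ [-1]
        else if down.getD i false then acc ++ [1]
        else acc ++ [(PySem.List.pyGet? acc (-1)).getD 1]) []).getLast?.getD 1
      = ((pvEventsOf up down m).getLast?.map Prod.snd).getD 1 := by
  induction m with
  | zero => simp [pvBuild, pvEventsOf, pvExpand]
  | succ m ih =>
    obtain ⟨ih1, ih2⟩ := ih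
    have hstep : (List.range (m + 1)).foldl (fun acc i =>
        if up.getD i false then acc ++ [-1]
        else if down.getD i false then acc ++ [1]
        else acc ++ [(PySem.List.pyGet? acc (-1)).getD 1]) []
      = pvBuild up down m
        ++ [if up.getD m false then (-1 : Int)
            else if down.getD m false then 1
            else ((pvEventsOf up down m).getLast?.map Prod.snd).getD 1] := by
      rw [List.range_succ, List.foldl_append]
      simp only [List.foldl_cons, List.foldl_nil]
      rw [ih1]
      cases hu : up.getD m false
      · cases hd : down.getD m false
        · simp only [hu, hd, if_false, Bool.false_eq_true]
          rw [pyGet_neg_one_getD, ← ih1, ih2]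
        · simp [hu, hd]
      · simp [hu]
    constructor
    · rw [hstep, pvBuild_succ]
    · rw [hstep, List.getLast?_concat, pvEventsOf_succ]
      cases hu : up.getD m false
      · cases hd : down.getD m false
        · simp [hu, hd]
        · simp [hu, hd, List.getLast?_concat]
      · simp [hu, List.getLast?_concat]

theorem alt_eq_build (up down : List Bool) :
    get_me_direction_alt up down = pvBuild up down up.length := by
  unfold get_me_direction_alt pvBuild
  dsimp only
  rw [pvZipFold]
  cases pvEventsOf up down up.length with
  | nil => simp
  | cons e rest =>
    obtain ⟨p, v⟩ := e
    simp

theorem get_me_direction_eq (up down : List Bool) :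
    get_me_direction up down = get_me_direction_alt up down := by
  rw [alt_eq_build]
  unfold get_me_direction
  exact (pvInvariant up down up.length).1

-- ===== VERDICT (by name: the statement is the Claim_ definition above) =====
theorem get_me_direction_spec : Claim_equal_get_me_direction := by
  intro up down _ _
  exact get_me_direction_eq up down
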